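-- pv_equiv track=rewrite | github.com/kozmind/Permutations-fun- | permutations.py | default_format
-- ===== SOURCE A (Python) =====
-- def default_format(expression):
--     """Приводит вариант к универсальному формату, чтобы отсечь повторения."""
--     if expression[0] == '+':
--         expression = expression[1:]
--     prev, split_exp = 0, []
--     for _num, _symbol in enumerate(expression[1:]):
--         if _symbol == '+':
--             split_exp.append(expression[prev:_num + 1])
--             prev = _num + 2
--         elif _symbol == '-':
--             split_exp.append(expression[prev:_num + 1])
--             prev = _num + 1
--     split_exp.append(expression[prev:])
--     for n, sub_split_exp in enumerate(split_exp):
--         if sub_split_exp[0] == '-':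
--             minus = '-'
--             sub_split_exp = sub_split_exp[1:]
--         else:
--             minus = ''
--         prev, sub_list = 0, []
--         for _num, _symbol in enumerate(sub_split_exp[1:]):
--             if _symbol == '*' or _symbol == '/':
--                 if prev == 0:
--                     sub_list.append(f'*{sub_split_exp[prev:_num + 1]}')
--                     prev = _num + 1
--                 else:
--                     sub_list.append(sub_split_exp[prev:_num + 1])
--                     prev = _num + 1
--         sub_list.append(sub_split_exp[prev:])
--         sub_list.sort(key=lambda _: _.count('/'))
--         sub_list.sort(key=len, reverse=True)
--         split_exp[n] = f"{minus}{''.join(sub_list)}".replace('-*', '-')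
--         if split_exp[n][0] == '*':
--             split_exp[n] = split_exp[n][1:]
--     split_exp.sort(key=lambda _: _.count('/'))
--     split_exp.sort(key=lambda _: _.count('-'))
--     split_exp.sort(key=len, reverse=True)
--     return '+'.join(split_exp).replace('+-', '-')
-- ===== SOURCE B (Python) =====
-- def _cut(s, kept, dropped):
--     """Split s at delimiter characters (never at position 0); a kept delimiter
--     starts the next piece, a dropped one is discarded."""
--     pieces, cur = [], s[0]
--     for c in s[1:]:
--         if c in dropped:
--             pieces.append(cur)
--             cur = ''
--         elif c in kept:
--             pieces.append(cur)
--             cur = c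
--         else:
--             cur += c
--     pieces.append(cur)
--     return pieces
--
--
-- def _normalize_term(term):
--     sign = '-' if term.startswith('-') else ''
--     body = term[len(sign):]
--     if not body:
--         return sign
--     pieces = _cut(body, '*/', '')
--     if len(pieces) > 1:
--         pieces = ['*' + pieces[0]] + pieces[1:]
--     pieces.sort(key=lambda f: f.count('/'))
--     pieces.sort(key=len, reverse=True)
--     joined = (sign + ''.join(pieces)).replace('-*', '-')
--     return joined[1:] if joined.startswith('*') else joined
--
--
-- def default_format(expression):
--     s = expression[1:] if expression.startswith('+') else expression
--     terms = [_normalize_term(t) for t in _cut(s, '-', '+')]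
--     terms.sort(key=lambda t: t.count('/'))
--     terms.sort(key=lambda t: t.count('-'))
--     terms.sort(key=len, reverse=True)
--     return '+'.join(terms).replace('+-', '-')
-- ===== Notes on version B (the rewrite author's own statement) =====
-- stated objective: simpler
-- what changed: Replaces A's manual index/slice arithmetic (enumerate with prev pointers and re-slicing) by one shared accumulator-based splitter _cut used for both the term split and the factor split, with the synthetic '*' prefix added explicitly only when a term has several factors; the same stable multi-key sorts and fix-up replaces are then applied.
import Mathlib
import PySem

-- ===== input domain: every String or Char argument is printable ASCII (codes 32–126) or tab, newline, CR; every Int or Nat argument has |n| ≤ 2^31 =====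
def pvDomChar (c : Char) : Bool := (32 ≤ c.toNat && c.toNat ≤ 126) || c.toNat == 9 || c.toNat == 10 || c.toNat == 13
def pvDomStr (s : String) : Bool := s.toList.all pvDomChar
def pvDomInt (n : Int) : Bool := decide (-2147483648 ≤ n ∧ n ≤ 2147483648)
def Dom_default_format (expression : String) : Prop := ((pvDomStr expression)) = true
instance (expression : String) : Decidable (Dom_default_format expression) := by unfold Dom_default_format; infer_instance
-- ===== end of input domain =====

-- Port of default_format (canonicalising an arithmetic-expression string) and of a
-- re-implementation B that replaces A's index/slice bookkeeping by one shared
-- accumulator-based splitter; proved to return the same string wherever A returns.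


-- ===== PORT A =====
-- the body of A's first for-loop (term split; state = (prev, split_exp))
def pvA_termStep (s : List Char) (st : Int × List (List Char)) (p : Int × Char) :
    Int × List (List Char) :=
  if p.2 = '+' then (p.1 + 2, st.2 ++ [PySem.List.slice s (some st.1) (some (p.1 + 1))])
  else if p.2 = '-' then (p.1 + 1, st.2 ++ [PySem.List.slice s (some st.1) (some (p.1 + 1))])
  else st

-- the body of A's inner for-loop (factor split; state = (prev, sub_list))
def pvA_factStep (sub : List Char) (st : Int × List (List Char)) (p : Int × Char) :
    Int × List (List Char) :=
  if p.2 = '*' ∨ p.2 = '/' then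
    if st.1 = 0 then (p.1 + 1, st.2 ++ ['*' :: PySem.List.slice sub (some st.1) (some (p.1 + 1))])
    else (p.1 + 1, st.2 ++ [PySem.List.slice sub (some st.1) (some (p.1 + 1))])
  else st

-- A's term split: the enumerate loop plus the trailing append
def pvA_split (s : List Char) : List (List Char) :=
  let st := (PySem.List.enumerate (PySem.List.slice s (some 1) none) 0).foldl (pvA_termStep s) (0, [])
  st.2 ++ [PySem.List.slice s (some st.1) none]

-- A's per-term body (minus strip, factor split, two stable sorts, join, fix-ups)
def pvA_term (t : List Char) : List Char :=
  let minus : List Char := if PySem.List.pyGet? t 0 = some '-' then ['-'] else []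
  let sub := if PySem.List.pyGet? t 0 = some '-' then PySem.List.slice t (some 1) none else t
  let st := (PySem.List.enumerate (PySem.List.slice sub (some 1) none) 0).foldl (pvA_factStep sub) (0, [])
  let subList := st.2 ++ [PySem.List.slice sub (some st.1) none]
  let s1 := PySem.List.sorted subList (fun x => x.count '/') false
  let s2 := PySem.List.sorted s1 (fun x => x.length) true
  let r := PySem.Chars.replace (minus ++ PySem.Chars.join [] s2) ['-', '*'] ['-']
  if PySem.List.pyGet? r 0 = some '*' then PySem.List.slice r (some 1) none else r

def default_format (expression : String) : String :=
  let e := expression.toList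
  let s := if PySem.List.pyGet? e 0 = some '+' then PySem.List.slice e (some 1) none else e
  let terms := (pvA_split s).map pvA_term
  let t1 := PySem.List.sorted terms (fun x => x.count '/') false
  let t2 := PySem.List.sorted t1 (fun x => x.count '-') false
  let t3 := PySem.List.sorted t2 (fun x => x.length) true
  String.ofList (PySem.Chars.replace (PySem.Chars.join ['+'] t3) ['+', '-'] ['-'])

-- ===== PORT B =====
-- B's shared splitter _cut: accumulate the current piece; a dropped delimiter ends
-- the piece, a kept delimiter ends it and starts the next piece with itself.
def pvB_cut (kept dropped cur : List Char) : List Char → List (List Char)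
  | [] => [cur]
  | c :: rest =>
    if c ∈ dropped then cur :: pvB_cut kept dropped [] rest
    else if c ∈ kept then cur :: pvB_cut kept dropped [c] rest
    else pvB_cut kept dropped (cur ++ [c]) rest

-- _cut(s, …) itself: the first character always opens the first piece
-- (Source B raises IndexError on s == ''; that case is outside Pre_, [] here is junk)
def pvB_cutTop (kept dropped s : List Char) : List (List Char) :=
  match s with
  | [] => []
  | c :: rest => pvB_cut kept dropped [c] rest

-- Source B's "if len(pieces) > 1: pieces = ['*' + pieces[0]] + pieces[1:]"
def pvB_mark (ps : List (List Char)) : List (List Char) :=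
  if 1 < ps.length then ('*' :: ps.headI) :: ps.tail else ps

-- B's _normalize_term
def pvB_term (t : List Char) : List Char :=
  let sign : List Char := if PySem.Chars.startswith t ['-'] then ['-'] else []
  let body := PySem.List.slice t (some (sign.length : Int)) none
  if body = [] then sign
  else
    let ps := pvB_mark (pvB_cutTop ['*', '/'] [] body)
    let f1 := PySem.List.sorted ps (fun x => x.count '/') false
    let f2 := PySem.List.sorted f1 (fun x => x.length) true
    let j := PySem.Chars.replace (sign ++ PySem.Chars.join [] f2) ['-', '*'] ['-']
    if PySem.Chars.startswith j ['*'] then PySem.List.slice j (some 1) none else j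

def default_format_alt (expression : String) : String :=
  let e := expression.toList
  let s := if PySem.Chars.startswith e ['+'] then PySem.List.slice e (some 1) none else e
  let terms := (pvB_cutTop ['-'] ['+'] s).map pvB_term
  let t1 := PySem.List.sorted terms (fun x => x.count '/') false
  let t2 := PySem.List.sorted t1 (fun x => x.count '-') false
  let t3 := PySem.List.sorted t2 (fun x => x.length) true
  String.ofList (PySem.Chars.replace (PySem.Chars.join ['+'] t3) ['+', '-'] ['-'])

-- ===== PRECONDITION & SPEC =====
-- Pre_ is exactly where the Python A returns normally: A raises IndexError when the
-- ('+'-stripped) expression is empty or when a '+' delimiter (never at position 0) is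
-- last or immediately followed by '+' or '-' (these create an empty term, and A then
-- indexes term[0]).
def Pre_default_format (expression : String) : Prop :=
  (if expression.toList.head? = some '+' then expression.toList.tail else expression.toList) ≠ [] ∧
  ∀ k, k < (if expression.toList.head? = some '+' then expression.toList.tail else expression.toList).length →
    (1 ≤ k →
     (if expression.toList.head? = some '+' then expression.toList.tail else expression.toList)[k]? = some '+' →
     (k + 1 < (if expression.toList.head? = some '+' then expression.toList.tail else expression.toList).length ∧
      (if expression.toList.head? = some '+' then expression.toList.tail else expression.toList)[k+1]? ≠ some '+' ∧
      (if expression.toList.head? = some '+' then expression.toList.tail else expression.toList)[k+1]? ≠ some '-'))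
instance (expression : String) : Decidable (Pre_default_format expression) := by
  unfold Pre_default_format; infer_instance

def pvWitness_default_format : String := "1*2-3/4+5"

def Spec_default_format (expression : String) (out : String) : Prop := out = default_format_alt expression
instance (expression : String) (out : String) : Decidable (Spec_default_format expression out) := by
  unfold Spec_default_format; infer_instance

-- ===== CLAIM (what is proved, stated in full; the proofs are below) =====
def Claim_equal_default_format : Prop := ∀ (expression : String), Dom_default_format expression → Pre_default_format expression → Spec_default_format expression (default_format expression)

-- ===== LEMMAS AND PROOFS =====

-- proof-only helpers: the remainder of A's loops from an intermediate state
def pvA_runT (s ys : List Char) (j p : Int) (acc : List (List Char)) : List (List Char) :=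
  let st := (PySem.List.enumerate ys j).foldl (pvA_termStep s) (p, acc)
  st.2 ++ [PySem.List.slice s (some st.1) none]

def pvA_runF (sub ys : List Char) (j p : Int) (acc : List (List Char)) : List (List Char) :=
  let st := (PySem.List.enumerate ys j).foldl (pvA_factStep sub) (p, acc)
  st.2 ++ [PySem.List.slice sub (some st.1) none]

lemma pvA_runT_cons (s : List Char) (c : Char) (ys : List Char) (j p : Int) (acc : List (List Char)) :
    pvA_runT s (c :: ys) j p acc
      = pvA_runT s ys (j+1) (pvA_termStep s (p, acc) (j, c)).1 (pvA_termStep s (p, acc) (j, c)).2 := by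
  simp [pvA_runT, PySem.List.enumerate_cons]

lemma pvA_runF_cons (sub : List Char) (c : Char) (ys : List Char) (j p : Int) (acc : List (List Char)) :
    pvA_runF sub (c :: ys) j p acc
      = pvA_runF sub ys (j+1) (pvA_factStep sub (p, acc) (j, c)).1 (pvA_factStep sub (p, acc) (j, c)).2 := by
  simp [pvA_runF, PySem.List.enumerate_cons]

lemma pv_pyGet?_zero (t : List Char) : PySem.List.pyGet? t 0 = t.head? := by
  cases t <;> simp [PySem.List.pyGet?, PySem.List.pyIdx?]

lemma pv_startswith_single (t : List Char) (c : Char) :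
    PySem.Chars.startswith t [c] = true ↔ t.head? = some c := by
  rw [PySem.Chars.startswith_iff]
  cases t with
  | nil => simp
  | cons a r =>
    constructor
    · rintro ⟨u, hu⟩
      simp at hu; simp [hu.1]
    · intro h
      simp at h; subst h; exact ⟨r, rfl⟩

lemma pv_drop_head (s : List Char) (i : Nat) (c : Char) (ys : List Char)
    (h : s.drop (i+1) = c :: ys) : s[i+1]? = some c := by
  have h2 := (List.getElem?_drop (xs := s) (i := i+1) (j := 0)).symm
  rw [h] at h2; simpa using h2

lemma pv_drop_tail (s : List Char) (i : Nat) (c : Char) (ys : List Char)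
    (h : s.drop (i+1) = c :: ys) : s.drop (i+2) = ys := by
  have h2 : s.drop (i+2) = (s.drop (i+1)).drop 1 := by rw [List.drop_drop]
  rw [h2, h]; rfl

lemma pv_take_snoc (s : List Char) (p i : Nat) (c : Char) (hp : p ≤ i+1) (hc : s[i+1]? = some c) :
    (s.drop p).take (i+2-p) = (s.drop p).take (i+1-p) ++ [c] := by
  have h1 : i+2-p = (i+1-p)+1 := by omega
  rw [h1, List.take_add_one]
  congr 1
  rw [List.getElem?_drop]
  have h2 : p + (i+1-p) = i+1 := by omega
  rw [h2, hc]; rfl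

lemma pv_take_all (s : List Char) (p i : Nat) (h : s.length ≤ i+1) :
    (s.drop p).take (i+1-p) = s.drop p := by
  apply List.take_of_length_le; simp; omega

lemma pvB_cut_ne_nil (kept dropped cur ys : List Char) :
    pvB_cut kept dropped cur ys ≠ [] := by
  induction ys generalizing cur with
  | nil => simp [pvB_cut]
  | cons c rest ih =>
    simp only [pvB_cut]
    split_ifs <;> simp [ih]

-- term-split invariant: A's enumerate/slice loop equals B's accumulator splitter
lemma pv_cutT (s : List Char) (ys : List Char) : ∀ (i p : Nat) (acc : List (List Char)),
    ys = s.drop (i+1) → p ≤ i+1 →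
    pvA_runT s ys (i : Int) ((p : Nat) : Int) acc
      = acc ++ pvB_cut ['-'] ['+'] ((s.drop p).take (i+1-p)) ys := by
  induction ys with
  | nil =>
    intro i p acc hys hp
    have hlen : s.length ≤ i+1 := by
      have := congrArg List.length hys; simp at this; omega
    simp [pvA_runT, PySem.List.slice_from_natCast, pvB_cut, pv_take_all s p i hlen]
  | cons c ys' ih =>
    intro i p acc hys hp
    have hc : s[i+1]? = some c := pv_drop_head s i c ys' hys.symm
    have hys' : ys' = s.drop (i+2) := (pv_drop_tail s i c ys' hys.symm).symm
    have hsl : PySem.List.slice s (some ((p:Nat):Int)) (some ((i:Int)+1)) = (s.drop p).take (i+1-p) := by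
      rw [show ((i:Int)+1) = ((i+1:Nat):Int) from by push_cast; ring, PySem.List.slice_natCast]
    rw [pvA_runT_cons]
    by_cases h1 : c = '+'
    · subst h1
      have hstep : pvA_termStep s (((p:Nat):Int), acc) ((i:Int), '+')
          = ((i:Int)+2, acc ++ [(s.drop p).take (i+1-p)]) := by
        simp [pvA_termStep, hsl]
      rw [hstep]
      have ihx := ih (i+1) (i+2) (acc ++ [(s.drop p).take (i+1-p)]) (by rw [hys']) (by omega)
      push_cast at ihx
      dsimp only
      rw [ihx, show i - i = 0 from by omega]
      simp [pvB_cut]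
    · by_cases h2 : c = '-'
      · subst h2
        have hstep : pvA_termStep s (((p:Nat):Int), acc) ((i:Int), '-')
            = ((i:Int)+1, acc ++ [(s.drop p).take (i+1-p)]) := by
          simp [pvA_termStep, hsl]
        rw [hstep]
        have ihx := ih (i+1) (i+1) (acc ++ [(s.drop p).take (i+1-p)]) (by rw [hys']) (by omega)
        push_cast at ihx
        dsimp only
        rw [ihx, show i+1-i = 1 from by omega]
        have hone : (s.drop (i+1)).take 1 = ['-'] := by
          rw [← hys]; rfl
        rw [hone]
        simp [pvB_cut]
      · have hstep : pvA_termStep s (((p:Nat):Int), acc) ((i:Int), c) = (((p:Nat):Int), acc) := by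
          simp [pvA_termStep, h1, h2]
        rw [hstep]
        have ihx := ih (i+1) p acc (by rw [hys']) (by omega)
        push_cast at ihx
        dsimp only
        rw [ihx, show i+1+1-p = i+2-p from by omega, pv_take_snoc s p i c hp hc]
        simp [pvB_cut, h1, h2]
-- factor-split invariant, after the first operator (prev ≥ 1)
lemma pv_cutF2 (sub : List Char) (ys : List Char) : ∀ (i p : Nat) (acc : List (List Char)),
    ys = sub.drop (i+1) → 1 ≤ p → p ≤ i+1 →
    pvA_runF sub ys (i : Int) ((p : Nat) : Int) acc
      = acc ++ pvB_cut ['*', '/'] [] ((sub.drop p).take (i+1-p)) ys := by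
  induction ys with
  | nil =>
    intro i p acc hys hp1 hp
    have hlen : sub.length ≤ i+1 := by
      have := congrArg List.length hys; simp at this; omega
    simp [pvA_runF, PySem.List.slice_from_natCast, pvB_cut, pv_take_all sub p i hlen]
  | cons c ys' ih =>
    intro i p acc hys hp1 hp
    have hc : sub[i+1]? = some c := pv_drop_head sub i c ys' hys.symm
    have hys' : ys' = sub.drop (i+2) := (pv_drop_tail sub i c ys' hys.symm).symm
    have hsl : PySem.List.slice sub (some ((p:Nat):Int)) (some ((i:Int)+1)) = (sub.drop p).take (i+1-p) := by
      rw [show ((i:Int)+1) = ((i+1:Nat):Int) from by push_cast; ring, PySem.List.slice_natCast]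
    rw [pvA_runF_cons]
    by_cases h1 : c = '*' ∨ c = '/'
    · have hpz : ¬ (((p:Nat):Int) = 0) := by simp; omega
      have hstep : pvA_factStep sub (((p:Nat):Int), acc) ((i:Int), c)
          = ((i:Int)+1, acc ++ [(sub.drop p).take (i+1-p)]) := by
        simp [pvA_factStep, h1, hsl]
        omega
      rw [hstep]
      have ihx := ih (i+1) (i+1) (acc ++ [(sub.drop p).take (i+1-p)]) (by rw [hys']) (by omega) (by omega)
      push_cast at ihx
      dsimp only
      rw [ihx, show i+1-i = 1 from by omega]
      have hone : (sub.drop (i+1)).take 1 = [c] := by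
        rw [← hys]; rfl
      rw [hone]
      rcases h1 with h1 | h1 <;> subst h1 <;> simp [pvB_cut]
    · have hstep : pvA_factStep sub (((p:Nat):Int), acc) ((i:Int), c) = (((p:Nat):Int), acc) := by
        simp [pvA_factStep, h1]
      rw [hstep]
      have ihx := ih (i+1) p acc (by rw [hys']) hp1 (by omega)
      push_cast at ihx
      dsimp only
      rw [ihx, show i+1+1-p = i+2-p from by omega, pv_take_snoc sub p i c hp hc]
      have hcm : ¬ (c = '*' ∨ c = '/') := h1
      simp [pvB_cut, show ¬ c = '*' from fun h => hcm (Or.inl h),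
        show ¬ c = '/' from fun h => hcm (Or.inr h)]
-- factor-split invariant, inside the first factor (prev = 0)
lemma pv_cutF1 (sub : List Char) (ys : List Char) : ∀ (i : Nat),
    ys = sub.drop (i+1) →
    pvA_runF sub ys (i : Int) 0 []
      = pvB_mark (pvB_cut ['*', '/'] [] (sub.take (i+1)) ys) := by
  induction ys with
  | nil =>
    intro i hys
    have hlen : sub.length ≤ i+1 := by
      have := congrArg List.length hys; simp at this; omega
    simp [pvA_runF, pvB_cut, pvB_mark, List.take_of_length_le hlen]
  | cons c ys' ih =>
    intro i hys
    have hc : sub[i+1]? = some c := pv_drop_head sub i c ys' hys.symm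
    have hys' : ys' = sub.drop (i+2) := (pv_drop_tail sub i c ys' hys.symm).symm
    rw [pvA_runF_cons]
    by_cases h1 : c = '*' ∨ c = '/'
    · have hstep : pvA_factStep sub ((0:Int), []) ((i:Int), c)
          = ((i:Int)+1, [('*' : Char) :: sub.take (i+1)]) := by
        have hsl : PySem.List.slice sub (some (0:Int)) (some ((i:Int)+1)) = sub.take (i+1) := by
          rw [show ((i:Int)+1) = ((i+1:Nat):Int) from by push_cast; ring,
            show ((0:Int)) = ((0:Nat):Int) from rfl, PySem.List.slice_natCast]
          simp
        simp [pvA_factStep, h1, hsl]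
      rw [hstep]
      have ihx := pv_cutF2 sub ys' (i+1) (i+1) [('*' : Char) :: sub.take (i+1)] (by rw [hys']) (by omega) (by omega)
      push_cast at ihx
      dsimp only
      rw [ihx, show i+1-i = 1 from by omega]
      have hone : (sub.drop (i+1)).take 1 = [c] := by
        rw [← hys]; rfl
      rw [hone]
      have hcut : pvB_cut ['*', '/'] [] (sub.take (i+1)) (c :: ys')
          = sub.take (i+1) :: pvB_cut ['*', '/'] [] [c] ys' := by
        rcases h1 with h1 | h1 <;> subst h1 <;> simp [pvB_cut]
      rw [hcut, pvB_mark]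
      have hlen : 1 < (sub.take (i+1) :: pvB_cut ['*', '/'] [] [c] ys').length := by
        have hne := pvB_cut_ne_nil ['*', '/'] [] [c] ys'
        cases hx : pvB_cut ['*', '/'] [] [c] ys' with
        | nil => exact absurd hx hne
        | cons a b => simp
      rw [if_pos hlen]
      simp
    · have hstep : pvA_factStep sub ((0:Int), []) ((i:Int), c) = ((0:Int), ([] : List (List Char))) := by
        simp [pvA_factStep, h1]
      rw [hstep]
      have ihx := ih (i+1) (by rw [hys'])
      push_cast at ihx
      dsimp only
      rw [ihx]
      have htake : sub.take (i+1+1) = sub.take (i+1) ++ [c] := by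
        rw [List.take_add_one, hc]; rfl
      rw [htake]
      have hcm : ¬ (c = '*' ∨ c = '/') := h1
      have hcut : pvB_cut ['*', '/'] [] (sub.take (i+1)) (c :: ys')
          = pvB_cut ['*', '/'] [] (sub.take (i+1) ++ [c]) ys' := by
        simp [pvB_cut, show ¬ c = '*' from fun h => hcm (Or.inl h),
          show ¬ c = '/' from fun h => hcm (Or.inr h)]
      rw [hcut]
lemma pv_split_eq (s : List Char) (hs : s ≠ []) :
    pvA_split s = pvB_cutTop ['-'] ['+'] s := by
  cases s with
  | nil => exact absurd rfl hs
  | cons c0 rest =>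
    have h0 : pvA_split (c0 :: rest) = pvA_runT (c0 :: rest) rest 0 0 [] := by
      simp [pvA_split, pvA_runT, PySem.List.slice_from_one]
    rw [h0]
    have h1 := pv_cutT (c0 :: rest) rest 0 0 [] (by simp) (by omega)
    simp only [Nat.cast_zero] at h1
    rw [h1]
    simp [pvB_cutTop]

lemma pv_star_strip (r : List Char) :
    (if PySem.List.pyGet? r 0 = some '*' then r.tail else r)
      = (if PySem.Chars.startswith r ['*'] then r.tail else r) := by
  by_cases h : r.head? = some '*'
  · rw [if_pos (by rw [pv_pyGet?_zero]; exact h), if_pos (by rw [pv_startswith_single]; exact h)]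
  · rw [if_neg (by rw [pv_pyGet?_zero]; exact h), if_neg (by rw [pv_startswith_single]; exact h)]

lemma pv_term_eq (t : List Char) : pvA_term t = pvB_term t := by
  by_cases hm : t.head? = some '-'
  · -- negative term
    have hA1 : PySem.List.pyGet? t 0 = some '-' := by rw [pv_pyGet?_zero]; exact hm
    have hB1 : PySem.Chars.startswith t ['-'] = true := by rw [pv_startswith_single]; exact hm
    simp only [pvA_term, pvB_term, hA1, hB1, if_pos, List.length_cons, List.length_nil]
    cases hsub : PySem.List.slice t (some 1) none with
    | nil =>
      decide
    | cons b bs =>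
      rw [if_neg (show ¬ (b :: bs) = ([] : List Char) from by simp)]
      have hF := pv_cutF1 (b :: bs) bs 0 (by simp)
      simp only [Nat.cast_zero] at hF
      have hF' : (List.foldl (pvA_factStep (b :: bs)) (0, []) (PySem.List.enumerate bs 0)).2
            ++ [PySem.List.slice (b :: bs)
                 (some (List.foldl (pvA_factStep (b :: bs)) (0, []) (PySem.List.enumerate bs 0)).1) none]
          = pvB_mark (pvB_cutTop ['*', '/'] [] (b :: bs)) := by
        have h0 := hF
        simp only [pvA_runF] at h0
        rw [h0]
        simp [pvB_cutTop]
      simp only [PySem.List.slice_from_one, List.tail_cons]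
      rw [hF']
      rw [pv_star_strip]
  · -- nonnegative term
    have hA1 : ¬ PySem.List.pyGet? t 0 = some '-' := by rw [pv_pyGet?_zero]; exact hm
    have hB1 : ¬ PySem.Chars.startswith t ['-'] = true := by rw [pv_startswith_single]; exact hm
    simp only [pvA_term, pvB_term, hA1, hB1, Bool.false_eq_true, if_false,
      List.length_nil, Nat.cast_zero, PySem.List.slice_zero_start, PySem.List.slice_none_none]
    cases t with
    | nil =>
      decide
    | cons b bs =>
      rw [if_neg (show ¬ (b :: bs) = ([] : List Char) from by simp)]
      have hF := pv_cutF1 (b :: bs) bs 0 (by simp)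
      simp only [Nat.cast_zero] at hF
      have hF' : (List.foldl (pvA_factStep (b :: bs)) (0, []) (PySem.List.enumerate bs 0)).2
            ++ [PySem.List.slice (b :: bs)
                 (some (List.foldl (pvA_factStep (b :: bs)) (0, []) (PySem.List.enumerate bs 0)).1) none]
          = pvB_mark (pvB_cutTop ['*', '/'] [] (b :: bs)) := by
        have h0 := hF
        simp only [pvA_runF] at h0
        rw [h0]
        simp [pvB_cutTop]
      simp only [PySem.List.slice_from_one, List.tail_cons]
      rw [hF']
      rw [pv_star_strip]

-- ===== VERDICT (by name: the statement is the Claim_ definition above) =====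
theorem default_format_spec : Claim_equal_default_format := by
  intro e _ hpre
  unfold Spec_default_format default_format default_format_alt
  obtain ⟨hne, _⟩ := hpre
  have hsA : (if PySem.List.pyGet? e.toList 0 = some '+' then PySem.List.slice e.toList (some 1) none else e.toList)
      = (if e.toList.head? = some '+' then e.toList.tail else e.toList) := by
    rw [pv_pyGet?_zero, PySem.List.slice_from_one]
  have hsB : (if PySem.Chars.startswith e.toList ['+'] then PySem.List.slice e.toList (some 1) none else e.toList)
      = (if e.toList.head? = some '+' then e.toList.tail else e.toList) := by
    rw [PySem.List.slice_from_one]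
    by_cases h : e.toList.head? = some '+'
    · rw [if_pos ((pv_startswith_single _ _).mpr h), if_pos h]
    · rw [if_neg (fun hh => h ((pv_startswith_single _ _).mp hh)), if_neg h]
  simp only [hsA, hsB]
  rw [pv_split_eq _ hne]
  rw [List.map_congr_left (fun t _ => pv_term_eq t)]
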